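-- pv_equiv track=rewrite | github.com/skyformat99/text | scripts/generate_unicode_case_tests.py | nonlanguage_condition
-- ===== SOURCE A (Python) =====
-- def nonlanguage_condition(conditions):
--     retval = None
--     for c in conditions:
--         if c in ['After_I', 'After_Soft_Dotted', 'Final_Sigma', 'More_Above', 'Not_Before_Dot']:
--             if retval != None:
--                 raise Error('Multiple non-language conditions are not expected')
--             retval = c
--     return retval
-- ===== SOURCE B (Python) =====
-- _NONLANG = ('After_I', 'After_Soft_Dotted', 'Final_Sigma',
--             'More_Above', 'Not_Before_Dot')
--
-- def nonlanguage_condition(conditions):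
--     # Inverted traversal: loop over the five fixed names, not over `conditions`.
--     total = sum(conditions.count(name) for name in _NONLANG)
--     if total > 1:
--         raise Error('Multiple non-language conditions are not expected')
--     for name in _NONLANG:
--         if name in conditions:
--             return name
--     return None
-- ===== Notes on version B (the rewrite author's own statement) =====
-- stated objective: alternative
-- what changed: Inverts the traversal: instead of A's single scan over `conditions` testing each element's membership in the five-name list while tracking one retval, B iterates over the five fixed names, summing their occurrence counts in `conditions` to detect multiplicity (raising the same NameError when total>1), then returns the unique present name (correct because at most one match exists, so first-in-conditions order coincides with it).
import Mathlib
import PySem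

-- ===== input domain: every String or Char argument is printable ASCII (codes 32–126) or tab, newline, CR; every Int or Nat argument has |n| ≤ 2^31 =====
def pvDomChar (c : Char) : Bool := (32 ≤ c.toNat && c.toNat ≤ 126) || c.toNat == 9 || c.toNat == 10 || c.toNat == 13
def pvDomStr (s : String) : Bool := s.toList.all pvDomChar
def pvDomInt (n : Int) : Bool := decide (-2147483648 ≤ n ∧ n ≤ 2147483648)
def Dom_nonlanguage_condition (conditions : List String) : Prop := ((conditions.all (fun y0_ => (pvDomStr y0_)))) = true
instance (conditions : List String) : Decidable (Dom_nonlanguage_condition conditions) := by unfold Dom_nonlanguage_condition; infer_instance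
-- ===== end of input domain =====

-- B inverts the traversal: it loops over the five fixed condition names (summing their
-- occurrence counts in `conditions` to detect multiplicity, then returning the unique
-- present name) instead of A's scan over `conditions` with a membership test; objective: alternative.
-- On inputs with two or more matching conditions both Pythons raise (the same NameError);
-- Pre_ excludes exactly those inputs.


-- the five non-language condition names (the literal list/tuple in both Pythons)
def pvLangs : List String := ["After_I", "After_Soft_Dotted", "Final_Sigma", "More_Above", "Not_Before_Dot"]

-- ===== PORT A =====
-- A's loop carrying retval; the outer Option models the `raise`: none = the exception path
-- (reached only when a second match is seen, which Pre_ excludes).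
def pvALoop (cs : List String) (retval : Option String) : Option (Option String) :=
  match cs with
  | [] => some retval
  | c :: rest =>
      if c ∈ pvLangs then
        if retval ≠ none then none   -- raise Error(...) — excluded by Pre_
        else pvALoop rest (some c)
      else pvALoop rest retval

def nonlanguage_condition (conditions : List String) : Option String :=
  (pvALoop conditions none).getD none

-- ===== PORT B =====
-- total = sum(conditions.count(name) for name in _NONLANG); the final
-- 'for name in _NONLANG: if name in conditions: return name / return None' is List.find?.
def nonlanguage_condition_alt (conditions : List String) : Option String :=
  let total := (pvLangs.map (fun name => PySem.List.count conditions name)).sum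
  if total > 1 then none   -- raise Error(...) — excluded by Pre_
  else pvLangs.find? (fun name => conditions.contains name)

-- ===== PRECONDITION & SPEC =====
-- Excludes inputs containing two or more of the five condition names, on which the Python A
-- (and B alike) raises a NameError from the undefined `Error`.
def Pre_nonlanguage_condition (conditions : List String) : Prop :=
  (conditions.filter (fun c => c ∈ pvLangs)).length ≤ 1
instance (conditions : List String) : Decidable (Pre_nonlanguage_condition conditions) := by unfold Pre_nonlanguage_condition; infer_instance

def pvWitness_nonlanguage_condition : List String := ["foo", "Final_Sigma", "bar"]

def Spec_nonlanguage_condition (conditions : List String) (out : Option String) : Prop := out = nonlanguage_condition_alt conditions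
instance (conditions : List String) (out : Option String) : Decidable (Spec_nonlanguage_condition conditions out) := by unfold Spec_nonlanguage_condition; infer_instance

-- ===== CLAIM (what is proved, stated in full; the proofs are below) =====
def Claim_equal_nonlanguage_condition : Prop := ∀ (conditions : List String), Dom_nonlanguage_condition conditions → Pre_nonlanguage_condition conditions → Spec_nonlanguage_condition conditions (nonlanguage_condition conditions)

-- ===== LEMMAS AND PROOFS =====

-- A's loop with a match already in hand and no further matches just carries it to the end.
theorem pvALoop_some (cs : List String) (x : String)
    (h : cs.filter (fun c => c ∈ pvLangs) = []) : pvALoop cs (some x) = some (some x) := by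
  induction cs with
  | nil => rfl
  | cons c rest ih =>
      by_cases hc : c ∈ pvLangs
      · simp [hc] at h
      · simp only [List.filter_cons, hc, decide_false, Bool.false_eq_true, if_false] at h
        simp only [pvALoop, hc, if_false]
        exact ih h

-- With at most one match, A's loop (started empty-handed) returns the first match, i.e. filter.head?.
theorem pvALoop_none (cs : List String)
    (h : (cs.filter (fun c => c ∈ pvLangs)).length ≤ 1) :
    pvALoop cs none = some ((cs.filter (fun c => c ∈ pvLangs)).head?) := by
  induction cs with
  | nil => rfl
  | cons c rest ih =>
      by_cases hc : c ∈ pvLangs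
      · simp only [List.filter_cons, hc, decide_true, if_true, List.length_cons] at h ⊢
        have hrest : rest.filter (fun c => c ∈ pvLangs) = [] :=
          List.eq_nil_of_length_eq_zero (by omega)
        simp [pvALoop, hc, pvALoop_some rest c hrest, hrest]
      · simp only [List.filter_cons, hc, decide_false] at h ⊢
        simpa [pvALoop, hc] using ih h

-- B's total: summing the count of each of the five (distinct) names equals the length of
-- the sublist of conditions that are among the five names.
theorem total_eq (cs : List String) :
    ((pvLangs.map (fun name => PySem.List.count cs name)).sum : Nat)
      = (cs.filter (fun c => c ∈ pvLangs)).length := by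
  induction cs with
  | nil => decide
  | cons c rest ih =>
      simp only [PySem.List.count_eq] at ih ⊢
      by_cases hc : c ∈ pvLangs
      · rcases (by simpa [pvLangs] using hc :
            c = "After_I" ∨ c = "After_Soft_Dotted" ∨ c = "Final_Sigma" ∨
            c = "More_Above" ∨ c = "Not_Before_Dot") with h | h | h | h | h <;>
          subst h <;>
          simp only [pvLangs, List.map, List.sum_cons, List.sum_nil, List.count_cons,
            List.filter_cons] at ih ⊢ <;>
          simp at ih ⊢ <;> omega
      · simp only [pvLangs, List.map, List.sum_cons, List.sum_nil, List.count_cons,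
          List.filter_cons] at ih ⊢
        have h1 : c ≠ "After_I" := by intro h; exact hc (by simp [pvLangs, h])
        have h2 : c ≠ "After_Soft_Dotted" := by intro h; exact hc (by simp [pvLangs, h])
        have h3 : c ≠ "Final_Sigma" := by intro h; exact hc (by simp [pvLangs, h])
        have h4 : c ≠ "More_Above" := by intro h; exact hc (by simp [pvLangs, h])
        have h5 : c ≠ "Not_Before_Dot" := by intro h; exact hc (by simp [pvLangs, h])
        simp [h1, h2, h3, h4, h5] at ih ⊢
        omega

-- find? over a list where the predicate holds exactly at x (which is in the list) returns x.
theorem find?_unique {α : Type} (p : α → Bool) (L : List α) (x : α)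
    (hx : x ∈ L) (hpx : p x = true) (huniq : ∀ l ∈ L, p l = true → l = x) :
    L.find? p = some x := by
  induction L with
  | nil => cases hx
  | cons a L ih =>
      by_cases ha : p a = true
      · have hax : a = x := huniq a (List.mem_cons_self ..) ha
        subst hax
        simp [ha]
      · simp only [List.find?_cons, ha]
        rcases List.mem_cons.mp hx with h | h
        · exact absurd (h ▸ hpx) ha
        · exact ih h (fun l hl hpl => huniq l (List.mem_cons_of_mem _ hl) hpl)

-- ===== VERDICT (by name: the statement is the Claim_ definition above) =====
theorem nonlanguage_condition_spec : Claim_equal_nonlanguage_condition := by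
  intro conditions _ hpre
  unfold Pre_nonlanguage_condition at hpre
  unfold Spec_nonlanguage_condition nonlanguage_condition nonlanguage_condition_alt
  rw [pvALoop_none conditions hpre]
  simp only [Option.getD_some]
  rw [if_neg (by rw [total_eq]; omega)]
  match hf : conditions.filter (fun c => c ∈ pvLangs) with
  | [] =>
      simp only [List.head?_nil]
      symm
      rw [List.find?_eq_none]
      intro l hl
      simp only [List.contains_iff_mem]
      intro hmem
      have : l ∈ conditions.filter (fun c => c ∈ pvLangs) := by
        simp [List.mem_filter, hmem, hl]
      simp [hf] at this
  | x :: rest =>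
      have hlen := hf ▸ hpre
      have hrest : rest = [] := List.eq_nil_of_length_eq_zero (by
        simp only [List.length_cons] at hlen; omega)
      subst hrest
      have hx := List.mem_filter.mp (hf ▸ List.mem_cons_self ..)
      simp only [decide_eq_true_eq] at hx
      symm
      simp only [List.head?_cons]
      apply find?_unique _ _ x hx.2
      · simp [hx.1]
      · intro l hl hpl
        simp only [List.contains_iff_mem] at hpl
        have : l ∈ conditions.filter (fun c => c ∈ pvLangs) := by
          simp [List.mem_filter, hpl, hl]
        rw [hf] at this
        simpa using this
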